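-- pv_equiv track=rewrite | github.com/chiphogg/aoc2020 | 14.py | _float_bits
-- ===== SOURCE A (Python) =====
-- def _set_bit(value, i_bit):
--     return value | (1 << i_bit)
--
-- def _clear_bit(value, i_bit):
--     return value & ~(1 << i_bit)
--
-- def _float_bits(value, indices):
--     if indices:
--         bit, *rest = indices
--         for x in _float_bits(value, rest):
--             yield _set_bit(x, bit)
--             yield _clear_bit(x, bit)
--     else:
--         yield value
-- ===== SOURCE B (Python) =====
-- def _set_bit(value, i_bit):
--     return value | (1 << i_bit)
--
-- def _clear_bit(value, i_bit):
--     return value & ~(1 << i_bit)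
--
-- def _float_bits(value, indices):
--     results = [value]
--     for bit in reversed(list(indices)):
--         results = [op(v, bit) for v in results for op in (_set_bit, _clear_bit)]
--     yield from results
-- ===== Notes on version B (the rewrite author's own statement) =====
-- stated objective: simpler
-- what changed: Replaces the recursive generator (one recursive frame per index, re-yielding through every level) by a flat iterative accumulation: start from [value] and, for each index in reverse, rebuild the list applying set-then-clear to each element; same enumeration order.
import Mathlib
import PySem

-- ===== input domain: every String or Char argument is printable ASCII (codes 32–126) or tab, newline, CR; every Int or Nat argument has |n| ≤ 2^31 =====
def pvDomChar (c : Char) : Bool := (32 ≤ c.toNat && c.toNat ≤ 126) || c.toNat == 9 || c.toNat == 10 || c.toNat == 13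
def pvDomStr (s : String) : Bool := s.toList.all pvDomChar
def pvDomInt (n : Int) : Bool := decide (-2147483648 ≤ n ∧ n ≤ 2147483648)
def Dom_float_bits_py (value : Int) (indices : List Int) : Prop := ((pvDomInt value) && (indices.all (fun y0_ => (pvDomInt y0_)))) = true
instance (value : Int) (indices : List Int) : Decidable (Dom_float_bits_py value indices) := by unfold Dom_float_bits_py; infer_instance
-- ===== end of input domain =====

-- B replaces A's recursive generator by a flat iterative accumulation over the reversed
-- index list (objective: simpler — no recursion, one list rebuilt per index, same order).

-- ===== PORT A =====
-- _set_bit(value, i_bit) = value | (1 << i_bit)   (Pre_ gives 0 ≤ i_bit, so toNat is exact)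
def pvSetBit (value i_bit : Int) : Int := PySem.Int.bor value ((1 : Int) <<< i_bit.toNat)
-- _clear_bit(value, i_bit) = value & ~(1 << i_bit)
def pvClearBit (value i_bit : Int) : Int := PySem.Int.band value (Int.not ((1 : Int) <<< i_bit.toNat))

-- generator flattened to the list of yielded values; the recursion mirrors A's
def float_bits_py (value : Int) (indices : List Int) : List Int :=
  match indices with
  | [] => [value]
  | bit :: rest =>
      (float_bits_py value rest).flatMap (fun x => [pvSetBit x bit, pvClearBit x bit])

-- ===== PORT B =====
-- one pass of B's loop body: [op(v, bit) for v in results for op in (_set_bit, _clear_bit)]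
def pvStep (results : List Int) (bit : Int) : List Int :=
  results.flatMap (fun v => [pvSetBit, pvClearBit].map (fun op => op v bit))

def float_bits_py_alt (value : Int) (indices : List Int) : List Int :=
  indices.reverse.foldl pvStep [value]

-- ===== PRECONDITION & SPEC =====
-- Pre_ excludes negative indices: there Python's 1 << i_bit raises ValueError in both A and B.
def Pre_float_bits_py (value : Int) (indices : List Int) : Prop :=
  ∀ i ∈ indices, 0 ≤ i
instance (value : Int) (indices : List Int) : Decidable (Pre_float_bits_py value indices) := by
  unfold Pre_float_bits_py; infer_instance

def pvWitness_float_bits_py : Int × List Int := (5, [0, 2])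

def Spec_float_bits_py (value : Int) (indices : List Int) (out : List Int) : Prop := out = float_bits_py_alt value indices
instance (value : Int) (indices : List Int) (out : List Int) : Decidable (Spec_float_bits_py value indices out) := by unfold Spec_float_bits_py; infer_instance

-- ===== CLAIM (what is proved, stated in full; the proofs are below) =====
def Claim_equal_float_bits_py : Prop := ∀ (value : Int) (indices : List Int), Dom_float_bits_py value indices → Pre_float_bits_py value indices → Spec_float_bits_py value indices (float_bits_py value indices)

-- ===== LEMMAS AND PROOFS =====
theorem float_bits_eq_foldl (value : Int) (indices : List Int) :
    float_bits_py value indices = indices.reverse.foldl pvStep [value] := by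
  induction indices with
  | nil => rfl
  | cons bit rest ih =>
      simp [float_bits_py, ih, List.foldl_append, pvStep]

-- ===== VERDICT (by name: the statement is the Claim_ definition above) =====
theorem float_bits_py_spec : Claim_equal_float_bits_py := by
  intro value indices _ _
  unfold Spec_float_bits_py float_bits_py_alt
  exact float_bits_eq_foldl value indices
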